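-- pv_equiv track=rewrite | github.com/dimauloagustin-tutorials/python-unsam | Clase02/diccionario_geringoso.py | toGeringoso
-- ===== SOURCE A (Python) =====
-- def toGeringoso(lista):
--     res = {}
--     vocales = ["a", "e", "i", "o", "u"]
--
--     for cadena in lista:
--         cadenaAux = []
--         for char in cadena:
--             if char in vocales:
--                 cadenaAux.append(char + "p" + char)
--             else:
--                 cadenaAux.append(char)
--         res[cadena] = "".join(cadenaAux)
--
--     return res
-- ===== SOURCE B (Python) =====
-- def toGeringoso(lista):
--     def ger(t):
--         # staged passes: one whole-string replace per vowel; the inserted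
--         # text "vpv" contains no other vowel, so later passes never touch it
--         for v in "aeiou":
--             t = t.replace(v, v + "p" + v)
--         return t
--
--     return {cadena: ger(cadena) for cadena in lista}
-- ===== Notes on version B (the rewrite author's own statement) =====
-- stated objective: alternative
-- what changed: Replaces A's single per-character scan with membership test and buffer list by five staged whole-string replace passes, one per vowel (the inserted 'vpv' text contains no other vowel, so the passes commute with A's expansion), assembled by a dict comprehension.
import Mathlib
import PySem

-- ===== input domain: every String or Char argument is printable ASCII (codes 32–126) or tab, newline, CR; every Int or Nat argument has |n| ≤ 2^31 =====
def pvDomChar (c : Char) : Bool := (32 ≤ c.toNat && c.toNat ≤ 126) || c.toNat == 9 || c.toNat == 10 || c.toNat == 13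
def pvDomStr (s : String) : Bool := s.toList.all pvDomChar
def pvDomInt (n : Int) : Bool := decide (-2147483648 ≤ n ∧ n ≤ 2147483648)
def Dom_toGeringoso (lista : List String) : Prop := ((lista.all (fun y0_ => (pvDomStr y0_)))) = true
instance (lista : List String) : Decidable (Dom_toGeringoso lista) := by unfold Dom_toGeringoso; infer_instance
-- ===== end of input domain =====

-- B replaces A's per-character scan (membership test + buffer list + join) by five
-- staged whole-string replace passes, one per vowel (alternative decomposition, same cost).

-- ===== PORT A =====
def toGeringoso (lista : List String) : List (String × String) :=
  (lista.foldl (fun (res : PySem.Dict String String) cadena =>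
    res.insert cadena (String.ofList (cadena.toList.foldl (fun cadenaAux char =>
      cadenaAux ++ (if (['a', 'e', 'i', 'o', 'u'] : List Char).contains char
                    then [char, 'p', char] else [char])) []))) PySem.Dict.empty).items

-- ===== PORT B =====
-- ger(t): for v in "aeiou": t = t.replace(v, v + "p" + v)
def pvGer (t : String) : String :=
  ("aeiou".toList).foldl
    (fun t v => PySem.Str.replace t (String.ofList [v]) (String.ofList [v, 'p', v])) t

def toGeringoso_alt (lista : List String) : List (String × String) :=
  (PySem.Dict.ofList (lista.map (fun cadena => (cadena, pvGer cadena)))).items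

-- ===== PRECONDITION & SPEC =====
def Spec_toGeringoso (lista : List String) (out : List (String × String)) : Prop := out = toGeringoso_alt lista
instance (lista : List String) (out : List (String × String)) : Decidable (Spec_toGeringoso lista out) := by unfold Spec_toGeringoso; infer_instance

-- ===== CLAIM (what is proved, stated in full; the proofs are below) =====
def Claim_equal_toGeringoso : Prop := ∀ (lista : List String), Dom_toGeringoso lista → Spec_toGeringoso lista (toGeringoso lista)

-- ===== LEMMAS AND PROOFS =====

-- one whole-string pass with a single-character pattern is a per-character flatMap
theorem pv_go_single (v : Char) (new : List Char) :
    ∀ (l acc : List Char) (fuel : Nat), l.length ≤ fuel →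
      PySem.Chars.replace.go [v] new fuel l acc =
        acc.reverse ++ l.flatMap (fun c => if c = v then new else [c]) := by
  intro l
  induction l with
  | nil =>
    intro acc fuel _
    cases fuel <;> simp [PySem.Chars.replace.go]
  | cons c t ih =>
    intro acc fuel hf
    cases fuel with
    | zero => simp at hf
    | succ fuel =>
      by_cases hc : c = v
      · subst hc
        have hpre : ([c] : List Char).isPrefixOf (c :: t) = true := by
          simp [List.isPrefixOf]
        rw [PySem.Chars.replace.go, if_pos hpre]
        simp only [List.length_singleton, List.drop_one, List.tail_cons]
        simp only [List.length_cons] at hf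
        rw [ih (new.reverse ++ acc) fuel (by omega)]
        simp
      · have hpre : ([v] : List Char).isPrefixOf (c :: t) = false := by
          simp [List.isPrefixOf, Ne.symm hc]
        rw [PySem.Chars.replace.go, if_neg (by simp [hpre])]
        simp only [List.length_cons] at hf
        rw [ih (c :: acc) fuel (by omega)]
        simp [hc]

theorem pv_replace_single (l : List Char) (v : Char) (new : List Char) :
    PySem.Chars.replace l [v] new = l.flatMap (fun c => if c = v then new else [c]) := by
  rw [PySem.Chars.replace, if_neg (by simp)]
  simpa using pv_go_single v new l [] l.length (le_refl _)

-- the five staged vowel passes expand a single character exactly as A's vowel test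
theorem pv_char_chain (c : Char) :
    (((((if c = 'a' then ['a','p','a'] else [c]).flatMap
        (fun d => if d = 'e' then ['e','p','e'] else [d])).flatMap
        (fun d => if d = 'i' then ['i','p','i'] else [d])).flatMap
        (fun d => if d = 'o' then ['o','p','o'] else [d])).flatMap
        (fun d => if d = 'u' then ['u','p','u'] else [d])) =
      (if (['a', 'e', 'i', 'o', 'u'] : List Char).contains c
       then [c, 'p', c] else [c]) := by
  by_cases h1 : c = 'a'
  · subst h1; decide
  by_cases h2 : c = 'e'
  · subst h2; decide
  by_cases h3 : c = 'i'
  · subst h3; decide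
  by_cases h4 : c = 'o'
  · subst h4; decide
  by_cases h5 : c = 'u'
  · subst h5; decide
  simp [List.contains_eq_mem, h1, h2, h3, h4, h5]

-- per string: B's ger equals A's buffer/join loop
theorem pv_ger_eq (cadena : String) :
    String.ofList (cadena.toList.foldl (fun cadenaAux char =>
      cadenaAux ++ (if (['a', 'e', 'i', 'o', 'u'] : List Char).contains char
                    then [char, 'p', char] else [char])) []) = pvGer cadena := by
  unfold pvGer
  rw [PySem.List.foldl_append_eq_flatMap]
  show _ = ("aeiou".toList).foldl
    (fun t v => PySem.Str.replace t (String.ofList [v]) (String.ofList [v, 'p', v])) cadena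
  have hs : ("aeiou".toList) = ['a','e','i','o','u'] := by decide
  rw [hs]
  simp only [List.foldl_cons, List.foldl_nil, PySem.Str.replace]
  simp only [String.toList_ofList, pv_replace_single, List.flatMap_assoc]
  rw [List.nil_append]
  congr 1
  apply List.flatMap_congr  -- congruence over the string's characters
  intro c _
  simpa [List.flatMap_assoc] using (pv_char_chain c).symm

-- ===== VERDICT (by name: the statement is the Claim_ definition above) =====
theorem toGeringoso_spec : Claim_equal_toGeringoso := by
  intro lista _
  unfold Spec_toGeringoso toGeringoso toGeringoso_alt
  have : PySem.Dict.ofList (lista.map (fun cadena => (cadena, pvGer cadena))) =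
      lista.foldl (fun (d : PySem.Dict String String) s => d.insert s (pvGer s))
        PySem.Dict.empty := by
    show (lista.map (fun cadena => (cadena, pvGer cadena))).foldl
        (fun (d : PySem.Dict String String) p => d.insert p.1 p.2) PySem.Dict.empty = _
    rw [List.foldl_map]
  rw [this]
  refine congrArg PySem.Dict.items ?_
  apply PySem.List.foldl_congr_mem
  intro acc s _
  rw [pv_ger_eq]
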